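-- pv_equiv track=rewrite | github.com/aLexzzz430/Cognitive-OS | core/orchestration/structured_answer.py | _segment_nonblank_ranges
-- ===== SOURCE A (Python) =====
-- from typing import Any, Callable, Dict, List, Optional, Sequence, Set, Tuple
--
-- def _segment_nonblank_ranges(blank_mask: Sequence[bool]) -> List[Tuple[int, int]]:
--     ranges: List[Tuple[int, int]] = []
--     start: Optional[int] = None
--     for idx, is_blank in enumerate(list(blank_mask) + [True]):
--         if not is_blank and start is None:
--             start = idx
--         elif is_blank and start is not None:
--             ranges.append((start, idx - 1))
--             start = None
--     return ranges
-- ===== SOURCE B (Python) =====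
-- from typing import Any, Callable, Dict, List, Optional, Sequence, Set, Tuple
--
-- def _segment_nonblank_ranges(blank_mask: Sequence[bool]) -> List[Tuple[int, int]]:
--     # Split the mask into maximal runs of equal truthiness; each falsy run
--     # contributes one (first_index, last_index) range.
--     mask = [bool(b) for b in blank_mask]
--     n = len(mask)
--     ranges: List[Tuple[int, int]] = []
--     i = 0
--     while i < n:
--         head = mask[i]
--         j = i
--         while j < n and mask[j] == head:
--             j += 1
--         if not head:
--             ranges.append((i, j - 1))
--         i = j
--     return ranges
-- ===== Notes on version B (the rewrite author's own statement) =====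
-- stated objective: alternative
-- what changed: Replaces A's transition-detecting scan with an Optional start state and an appended sentinel element by a run-splitting loop that finds each maximal run of equal truthiness and emits one range per falsy run.
import Mathlib
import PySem

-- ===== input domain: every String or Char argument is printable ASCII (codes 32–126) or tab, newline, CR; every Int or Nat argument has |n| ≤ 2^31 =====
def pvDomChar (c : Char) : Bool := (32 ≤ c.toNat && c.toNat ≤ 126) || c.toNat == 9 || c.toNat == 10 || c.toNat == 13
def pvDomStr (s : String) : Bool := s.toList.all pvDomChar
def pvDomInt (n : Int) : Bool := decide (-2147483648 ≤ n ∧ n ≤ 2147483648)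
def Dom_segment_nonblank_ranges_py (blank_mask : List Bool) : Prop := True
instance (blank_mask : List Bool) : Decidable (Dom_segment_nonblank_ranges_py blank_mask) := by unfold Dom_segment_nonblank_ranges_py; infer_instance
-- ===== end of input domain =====

-- B replaces A's start/None transition scan with a run-splitting loop (one range per falsy run); same O(n) cost.

-- ===== PORT A =====
-- one iteration of A's for-loop body: state = (ranges, start), p = (idx, is_blank)
def stepA (s : List (Int × Int) × Option Int) (p : Int × Bool) : List (Int × Int) × Option Int :=
  match s.2, p.2 with
  | none, false => (s.1, some p.1)                  -- not is_blank and start is None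
  | some st, true => (s.1 ++ [(st, p.1 - 1)], none) -- is_blank and start is not None
  | _, _ => s

def segment_nonblank_ranges_py (blank_mask : List Bool) : List (Int × Int) :=
  ((PySem.List.enumerate (blank_mask ++ [true]) 0).foldl stepA ([], none)).1

-- ===== PORT B =====
-- inner while loop of Source B: length of the leading run equal to head
def altRun (mask : List Bool) (head : Bool) : Nat :=
  match mask with
  | [] => 0
  | b :: rest => if b == head then altRun rest head + 1 else 0

-- outer while loop of Source B
def altLoop (mask : List Bool) (pos : Int) (ranges : List (Int × Int)) : List (Int × Int) :=
  match mask with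
  | [] => ranges
  | head :: rest =>
    let run := altRun (head :: rest) head
    altLoop ((head :: rest).drop run) (pos + (run : Int))
      (if head then ranges else ranges ++ [(pos, pos + (run : Int) - 1)])
  termination_by mask.length
  decreasing_by simp [altRun]

def segment_nonblank_ranges_py_alt (blank_mask : List Bool) : List (Int × Int) :=
  altLoop blank_mask 0 []

-- ===== PRECONDITION & SPEC =====
def Spec_segment_nonblank_ranges_py (blank_mask : List Bool) (out : List (Int × Int)) : Prop := out = segment_nonblank_ranges_py_alt blank_mask
instance (blank_mask : List Bool) (out : List (Int × Int)) : Decidable (Spec_segment_nonblank_ranges_py blank_mask out) := by unfold Spec_segment_nonblank_ranges_py; infer_instance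

-- ===== CLAIM (what is proved, stated in full; the proofs are below) =====
def Claim_equal_segment_nonblank_ranges_py : Prop := ∀ (blank_mask : List Bool), Dom_segment_nonblank_ranges_py blank_mask → Spec_segment_nonblank_ranges_py blank_mask (segment_nonblank_ranges_py blank_mask)

-- ===== LEMMAS AND PROOFS =====

lemma altLoop_nil (pos : Int) (acc : List (Int × Int)) : altLoop [] pos acc = acc := by
  rw [altLoop.eq_def]

lemma altLoop_cons (head : Bool) (rest : List Bool) (pos : Int) (acc : List (Int × Int)) :
    altLoop (head :: rest) pos acc =
      altLoop ((head :: rest).drop (altRun (head :: rest) head))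
        (pos + (altRun (head :: rest) head : Int))
        (if head then acc else acc ++ [(pos, pos + (altRun (head :: rest) head : Int) - 1)]) := by
  rw [altLoop.eq_def]

-- altLoop ignores a leading run of trues one element at a time
lemma altLoop_skip_true (rest : List Bool) (pos : Int) (acc : List (Int × Int)) :
    altLoop (rest.drop (altRun rest true)) (pos + (altRun rest true : Int)) acc
      = altLoop rest pos acc := by
  match rest with
  | [] => simp [altRun]
  | false :: r2 => simp [altRun]
  | true :: r2 =>
      rw [altLoop_cons]
      simp only [altRun, beq_self_eq_true, if_true, List.drop_succ_cons]

lemma altLoop_cons_true (rest : List Bool) (pos : Int) (acc : List (Int × Int)) :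
    altLoop (true :: rest) pos acc = altLoop rest (pos + 1) acc := by
  rw [altLoop_cons]
  simp only [altRun, beq_self_eq_true, if_true, List.drop_succ_cons]
  have h : (pos + ((altRun rest true + 1 : Nat) : Int)) = (pos + 1) + (altRun rest true : Int) := by
    push_cast; ring
  rw [h, altLoop_skip_true]

-- the head of what remains after dropping the leading equal run differs from it
lemma altRun_drop_head_ne (l : List Bool) (h b : Bool) (r2 : List Bool)
    (hd : l.drop (altRun l h) = b :: r2) : b ≠ h := by
  induction l generalizing r2 with
  | nil => simp [altRun] at hd
  | cons c tail ih =>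
      by_cases hc : c = h
      · subst hc
        simp only [altRun, beq_self_eq_true, if_true, List.drop_succ_cons] at hd
        exact ih r2 hd
      · rw [show altRun (c :: tail) h = 0 from by simp [altRun, hc], List.drop_zero] at hd
        injection hd with h1 _
        subst h1
        exact hc

-- folding stepA with a some-state over a run of falses leaves the state unchanged
lemma fold_some_skip_false (rest : List Bool) (pos st : Int) (acc : List (Int × Int)) :
    (PySem.List.enumerate (rest ++ [true]) pos).foldl stepA (acc, some st)
      = (PySem.List.enumerate ((rest.drop (altRun rest false)) ++ [true])
          (pos + (altRun rest false : Int))).foldl stepA (acc, some st) := by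
  induction rest generalizing pos with
  | nil => simp [altRun]
  | cons b r2 ih =>
      cases b with
      | true => simp [altRun]
      | false =>
          simp only [altRun, beq_self_eq_true, if_true, List.cons_append,
            PySem.List.enumerate_cons, List.foldl_cons, List.drop_succ_cons]
          have hstep : stepA (acc, some st) (pos, false) = (acc, some st) := rfl
          rw [hstep, ih (pos + 1)]
          have h : (pos + ((altRun r2 false + 1 : Nat) : Int)) = (pos + 1) + (altRun r2 false : Int) := by
            push_cast; ring
          rw [h]

-- main invariant: the none-state fold over the rest (plus sentinel) equals altLoop
lemma main_inv : ∀ (n : Nat) (mask : List Bool), mask.length ≤ n →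
    ∀ (pos : Int) (acc : List (Int × Int)),
    ((PySem.List.enumerate (mask ++ [true]) pos).foldl stepA (acc, none)).1 = altLoop mask pos acc := by
  intro n
  induction n with
  | zero =>
      intro mask hlen pos acc
      have : mask = [] := List.length_eq_zero_iff.mp (Nat.le_zero.mp hlen)
      subst this
      simp [PySem.List.enumerate_cons, PySem.List.enumerate_nil, stepA, altLoop_nil]
  | succ n ih =>
      intro mask hlen pos acc
      match mask with
      | [] =>
          simp [PySem.List.enumerate_cons, PySem.List.enumerate_nil, stepA, altLoop_nil]
      | true :: rest =>
          rw [altLoop_cons_true]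
          simp only [List.cons_append, PySem.List.enumerate_cons, List.foldl_cons]
          have hstep : stepA (acc, none) (pos, true) = (acc, none) := rfl
          rw [hstep]
          exact ih rest (by simp at hlen ⊢; omega) (pos + 1) acc
      | false :: rest =>
          simp only [List.cons_append, PySem.List.enumerate_cons, List.foldl_cons]
          have hstep : stepA (acc, none) (pos, false) = (acc, some pos) := rfl
          rw [hstep, fold_some_skip_false]
          rw [altLoop_cons]
          simp only [altRun, beq_self_eq_true, if_true, if_neg (by simp : ¬False),
            Bool.false_eq_true, List.drop_succ_cons]
          set r := altRun rest false with hr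
          have hlen' : rest.length ≤ n := by simp at hlen; omega
          cases hd : rest.drop r with
          | nil =>
              simp only [List.nil_append, PySem.List.enumerate_cons, PySem.List.enumerate_nil,
                List.foldl_cons, List.foldl_nil]
              have hstep2 : stepA (acc, some pos) (pos + 1 + (r : Int), true)
                  = (acc ++ [(pos, pos + 1 + (r : Int) - 1)], none) := rfl
              rw [show (pos + ((r + 1 : Nat) : Int)) = pos + 1 + (r : Int) from by push_cast; ring,
                hstep2, altLoop_nil]
          | cons b r2 =>
              have hb : b = true := by
                cases b
                · exact absurd rfl (altRun_drop_head_ne rest false false r2 (hr ▸ hd))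
                · rfl
              subst hb
              simp only [List.cons_append, PySem.List.enumerate_cons, List.foldl_cons]
              have hstep2 : stepA (acc, some pos) (pos + 1 + (r : Int), true)
                  = (acc ++ [(pos, pos + 1 + (r : Int) - 1)], none) := rfl
              rw [show (pos + ((r + 1 : Nat) : Int)) = pos + 1 + (r : Int) from by push_cast; ring,
                hstep2, altLoop_cons_true]
              have hl2 : r2.length ≤ n := by
                have h1 : (true :: r2).length = rest.length - r := by rw [← hd]; simp
                simp at h1; omega
              rw [ih r2 hl2 (pos + 1 + (r : Int) + 1) (acc ++ [(pos, pos + 1 + (r : Int) - 1)])]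

theorem pv_main (blank_mask : List Bool) :
    segment_nonblank_ranges_py blank_mask = segment_nonblank_ranges_py_alt blank_mask := by
  unfold segment_nonblank_ranges_py segment_nonblank_ranges_py_alt
  exact main_inv blank_mask.length blank_mask le_rfl 0 []

-- ===== VERDICT (by name: the statement is the Claim_ definition above) =====
theorem segment_nonblank_ranges_py_spec : Claim_equal_segment_nonblank_ranges_py := by
  intro blank_mask _
  unfold Spec_segment_nonblank_ranges_py
  exact pv_main blank_mask
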